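-- pv_equiv track=rewrite | github.com/SpectreDeath/skill-flywheel | src/skills/logic/sat_solver_optimization.py | subsumption_elimination
-- ===== SOURCE A (Python) =====
-- from typing import List, Dict, Any, Tuple, Optional, Set, Union
--
-- def subsumption_elimination(clauses: List[List[int]]) -> List[List[int]]:
--     """Eliminate subsumed clauses."""
--     clauses.sort(key=len)
--     result = []
--
--     for i, clause in enumerate(clauses):
--         is_subsumed = False
--         clause_set = set(clause)
--
--         for j in range(i + 1, len(clauses)):
--             if clause_set.issubset(set(clauses[j])):
--                 is_subsumed = True
--                 break
--
--         if not is_subsumed: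
--             result.append(clause)
--
--     return result
-- ===== SOURCE B (Python) =====
-- def subsumption_elimination(clauses):
--     """Eliminate subsumed clauses (same in-place sort as the original;
--     single back-to-front fold keeping only maximal survivor sets)."""
--     clauses.sort(key=len)
--     kept_sets, survivors = [], []
--     for clause in reversed(clauses):
--         cs = set(clause)
--         if not any(cs <= s for s in kept_sets):
--             kept_sets.append(cs)
--             survivors.append(clause)
--     survivors.reverse()
--     return survivors
-- ===== Notes on version B (the rewrite author's own statement) =====
-- stated objective: faster
-- what changed: Instead of scanning all later clauses for each clause, B folds once over the sorted list from the back, maintaining only the surviving (maximal) clause sets and testing each clause against those survivors alone (correct by transitivity of set inclusion); survivors are accumulated and reversed at the end.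
import Mathlib
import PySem

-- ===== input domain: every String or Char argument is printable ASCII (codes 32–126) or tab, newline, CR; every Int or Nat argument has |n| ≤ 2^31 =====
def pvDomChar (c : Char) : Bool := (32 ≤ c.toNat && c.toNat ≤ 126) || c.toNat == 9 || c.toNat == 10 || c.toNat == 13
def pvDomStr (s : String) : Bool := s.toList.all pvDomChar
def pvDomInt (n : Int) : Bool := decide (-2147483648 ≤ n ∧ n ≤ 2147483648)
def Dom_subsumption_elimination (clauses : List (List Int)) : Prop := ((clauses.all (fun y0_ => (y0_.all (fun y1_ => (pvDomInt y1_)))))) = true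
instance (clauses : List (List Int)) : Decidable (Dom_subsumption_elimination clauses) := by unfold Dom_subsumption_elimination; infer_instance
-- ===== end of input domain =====

-- B replaces A's all-later-clauses scan by one back-to-front fold that tests each clause
-- only against the surviving (maximal) clause sets kept so far; return values agree
-- (both Pythons sort the argument in place, so the mutation is identical too).


-- ===== PORT A =====
-- A's loop over the sorted list: clause i is dropped iff some clause j > i is a superset
def aLoop : List (List Int) → List (List Int)
  | [] => []
  | c :: rest =>
      if rest.any (fun d => PySem.Set.issubset (PySem.Set.ofList c) (PySem.Set.ofList d))
      then aLoop rest else c :: aLoop rest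

def subsumption_elimination (clauses : List (List Int)) : List (List Int) :=
  aLoop (PySem.List.sorted clauses (fun c => c.length))

-- ===== PORT B =====
-- one fold step of Source B's loop body: state = (kept_sets, survivors)
def bStep (st : List (PySem.Set Int) × List (List Int)) (clause : List Int) :
    List (PySem.Set Int) × List (List Int) :=
  let cs := PySem.Set.ofList clause
  if st.1.any (fun s => PySem.Set.issubset cs s) then st
  else (st.1 ++ [cs], st.2 ++ [clause])

def subsumption_elimination_alt (clauses : List (List Int)) : List (List Int) :=
  (((PySem.List.sorted clauses (fun c => c.length)).reverse.foldl bStep ([], [])).2).reverse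

-- ===== PRECONDITION & SPEC =====
def Spec_subsumption_elimination (clauses : List (List Int)) (out : List (List Int)) : Prop := out = subsumption_elimination_alt clauses
instance (clauses : List (List Int)) (out : List (List Int)) : Decidable (Spec_subsumption_elimination clauses out) := by unfold Spec_subsumption_elimination; infer_instance

-- ===== CLAIM (what is proved, stated in full; the proofs are below) =====
def Claim_equal_subsumption_elimination : Prop := ∀ (clauses : List (List Int)), Dom_subsumption_elimination clauses → Spec_subsumption_elimination clauses (subsumption_elimination clauses)

-- ===== LEMMAS AND PROOFS =====

-- abbreviation used only in the proofs
def pvSub (c d : List Int) : Bool := PySem.Set.issubset (PySem.Set.ofList c) (PySem.Set.ofList d)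

theorem pvSub_trans {a b c : List Int} (h1 : pvSub a b = true) (h2 : pvSub b c = true) :
    pvSub a c = true := by
  simp only [pvSub, PySem.Set.issubset_iff, PySem.Set.mem_ofList] at *
  exact fun x hx => h2 _ (h1 _ hx)

-- recursive rendering of B's fold, keeping survivor clauses (their sets are recomputed)
def bLoop : List (List Int) → List (List Int) → List (List Int)
  | _, [] => []
  | kept, c :: rest =>
      if kept.any (fun s => pvSub c s) then bLoop kept rest
      else c :: bLoop (kept ++ [c]) rest

-- the fold equals bLoop (survivor sets = sets of survivor clauses)
theorem foldl_bStep_eq_bLoop (rl : List (List Int)) :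
    ∀ (kept V : List (List Int)),
      (rl.foldl bStep (kept.map PySem.Set.ofList, V)).2 = V ++ bLoop kept rl := by
  induction rl with
  | nil => intro kept V; simp [bLoop]
  | cons c rest ih =>
      intro kept V
      have hany : (kept.map PySem.Set.ofList).any
          (fun s => PySem.Set.issubset (PySem.Set.ofList c) s)
          = kept.any (fun s => pvSub c s) := by
        simp only [List.any_map, pvSub]; rfl
      by_cases h : kept.any (fun s => pvSub c s) = true
      · simp only [List.foldl_cons, bStep, hany, h, if_true, bLoop, ih]
      · simp only [List.foldl_cons, bStep, hany, h, if_false, bLoop]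
        have := ih (kept ++ [c]) (V ++ [c])
        simp only [List.map_append, List.map_cons, List.map_nil] at this
        simp [this]

-- naive sweep: checks against ALL previously seen clauses
def nLoop : List (List Int) → List (List Int) → List (List Int)
  | _, [] => []
  | seen, c :: rest =>
      if seen.any (fun s => pvSub c s) then nLoop (c :: seen) rest
      else c :: nLoop (c :: seen) rest

-- A's loop generalized with extra clauses `seen` counting as "later"
def aSeen : List (List Int) → List (List Int) → List (List Int)
  | [], _ => []
  | c :: t, seen =>
      if (t ++ seen).any (fun d => pvSub c d) then aSeen t seen
      else c :: aSeen t seen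

theorem aSeen_nil (l : List (List Int)) : aSeen l [] = aLoop l := by
  induction l with
  | nil => rfl
  | cons c t ih => simp [aSeen, aLoop, ih, pvSub]

theorem aSeen_append (l : List (List Int)) (c : List Int) (seen : List (List Int)) :
    aSeen (l ++ [c]) seen
      = aSeen l (c :: seen) ++ (if seen.any (fun s => pvSub c s) then [] else [c]) := by
  induction l generalizing seen with
  | nil => simp [aSeen]
  | cons d l ih =>
      have hc : ((l ++ [c]) ++ seen).any (fun e => pvSub d e)
          = (l ++ c :: seen).any (fun e => pvSub d e) := by
        simp [List.any_append]
      simp only [List.cons_append, aSeen, hc, ih]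
      split <;> simp

theorem nLoop_eq_aSeen (rl seen : List (List Int)) :
    nLoop seen rl = (aSeen rl.reverse seen).reverse := by
  induction rl generalizing seen with
  | nil => rfl
  | cons c rest ih =>
      simp only [nLoop, List.reverse_cons, aSeen_append, List.reverse_append, ih]
      split <;> simp

theorem bLoop_eq_nLoop (rl : List (List Int)) :
    ∀ kept seen, (∀ c, kept.any (fun s => pvSub c s) = seen.any (fun s => pvSub c s)) →
      bLoop kept rl = nLoop seen rl := by
  induction rl with
  | nil => intro _ _ _; rfl
  | cons c rest ih =>
      intro kept seen H
      simp only [bLoop, nLoop, ← H c]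
      by_cases h : kept.any (fun s => pvSub c s) = true
      · simp only [h, if_true]
        refine ih kept (c :: seen) ?_
        intro x
        simp only [List.any_cons, ← H x]
        by_cases hx : pvSub x c = true
        · obtain ⟨d, hd, hcd⟩ := List.any_eq_true.mp h
          have : kept.any (fun s => pvSub x s) = true :=
            List.any_eq_true.mpr ⟨d, hd, pvSub_trans hx hcd⟩
          simp [this, hx]
        · simp [Bool.eq_false_iff.mpr hx]
      · simp only [if_neg h]
        refine congrArg (c :: ·) (ih (kept ++ [c]) (c :: seen) ?_)
        intro x
        simp [List.any_append, List.any_cons, H x, Bool.or_comm]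

-- ===== VERDICT (by name: the statement is the Claim_ definition above) =====
theorem subsumption_elimination_spec : Claim_equal_subsumption_elimination := by
  intro clauses _
  unfold Spec_subsumption_elimination subsumption_elimination subsumption_elimination_alt
  have h0 := foldl_bStep_eq_bLoop
    (PySem.List.sorted clauses (fun c => c.length)).reverse [] []
  simp only [List.map_nil, List.nil_append] at h0
  rw [h0, bLoop_eq_nLoop _ [] [] (fun _ => rfl), nLoop_eq_aSeen, List.reverse_reverse,
    List.reverse_reverse, aSeen_nil]
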